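-- pv_equiv track=rewrite | github.com/Christoforos-Spyretos/CBTN_Histology_Multi_Stain | data_utilities/scrape_dataset_subject_level.py | get_diagnosis
-- ===== SOURCE A (Python) =====
-- def get_diagnosis(primary_diagnosis, diagnosis_description):
--     """
--     Utility that given the list of primary diagnosis and description tries to
--     identify the tumor type.
--
--     Returns
--     tumor_type : the identified tumor type. Set to None if it fails
--     description : list of additional descriptions is case primaty diagnosis is Other
--     grade : LGG or HGG if it can be infered by the diagnosis, else None
--     """
--
--     tumor_types = {
--         "Atypical Teratoid Rhabdoid Tumor (ATRT)": "ATRT",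
--         "Not Reported": "None",
--         "Other": "None",
--         "Cavernoma": "CAVERNOMA",
--         "Brainstem glioma- Diffuse intrinsic pontine glioma": "DIPG",
--         "High-grade glioma/astrocytoma (WHO grade III/IV)": "ASTROCYTOMA",
--         "Low-grade glioma/astrocytoma (WHO grade I/II)": "ASTROCYTOMA",
--         "Germinoma": "GERMINOMA",
--         "Ganglioglioma": "GANGLIOGLIOMA",
--         "Teratoma": "TERATOMA",
--         "Ependymoma": "EPENDYMOMA",
--         "Neurofibroma/Plexiform": "NEUROFIBRILOMA-PLEXIFORM",
--         "Low-grade glioma/astrocytoma (WHO grade I/II); Other": "ASTROCYTOMA-OTHERS",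
--         "Medulloblastoma": "MEDULLOBLASTOMA",
--         "Ganglioglioma; Low-grade glioma/astrocytoma (WHO grade I/II)": "GANGLIOGLIOMA-ASTROCYTOMA",
--         "Meningioma": "MENINGIOMA",
--         "Embryonal Tumor with Multilayered Rosettes (ETMR); Other": "ETMR-OTHERS",
--         "Embryonal Tumor with Multilayered Rosettes (ETMR)": "ETMR",
--     }
--
--     description_types = [
--         "Glial neoplasm",
--         "pilocytic/piloid features",
--         "Rhabdoid Tumor" "Osteosarcoma" "Ependymoblastoma",
--     ]
--
--     description_types = {
--         "Not Applicable": "Not-applicable",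
--         "Inflammation": "INFLAMATION",
--         "Rhabdoid Tumor": "RHABDOID",
--         "Proteinaceous debris and small fragment of adenohypophysis": "Proteinaceous debris and small fragment of adenohypophysis",
--         "Lesional tissue with pilocytic/piloid features": "Lesional tissue with pilocytic/piloid features",
--         "Portions of white matter with a few reactive astrocytes and rare cells with mild atypia": "Portions of white matter with a few reactive astrocytes and rare cells with mild atypia",
--         "Glial neoplasm": "GLIAL-NEOPLASM",
--         "Low-grade glioma": "LOW-GRADE-GIOMA",
--         "Non-diagnostic tissue": "NON-DIAGNOSTIC-TISSUE",
--         "Osteosarcoma": "OSTEOSARCOMA",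
--         "Ependymoblastoma": "EPENDYMOBLASTOMA",
--     }
--
--     # if there is no diagnosis left
--     if len(primary_diagnosis) == 0:
--         tumor_type = None
--         description = None
--         grade = "Not-available"
--         return tumor_type, description, grade
--     else:
--         diagnosis_list = []
--         description_list = []
--         grade_list = []
--         for idx, d in enumerate(primary_diagnosis):
--             if "Other" in d:
--                 # check the diagnosis description
--                 check = [
--                     diagnosis_description[idx] == t for t in description_types.keys()
--                 ]
--                 if any(check):
--                     description_list.append(
--                         description_types[diagnosis_description[idx]]
--                     )
--                     grade_list.append("Not available")
--             elif not "Not Reported" in d: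
--                 # check which of the tumor types
--                 check = [d == t for t in tumor_types.keys()]
--                 if any(check):
--                     diagnosis_list.append(tumor_types[d])
--                 else:
--                     diagnosis_list.append("Tumor type not in default")
--
--                 # check LGG or HGG
--                 if "Low-grade" in d:
--                     grade_list.append("LGG")
--                 elif "High-grade" in d:
--                     grade_list.append("HGG")
--                 else:
--                     grade_list.append("Not available")
--
--         # return a list of unique elements of diagnosis, descriptions and grades
--         tumor_type = list(dict.fromkeys(diagnosis_list))
--         description = list(dict.fromkeys(description_list))
--         grade = list(dict.fromkeys(grade_list))
--
--         return tumor_type, description, grade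
-- ===== SOURCE B (Python) =====
-- def get_diagnosis(primary_diagnosis, diagnosis_description):
--     """Three independent passes (diagnosis / description / grade) over the
--     input instead of one interleaved loop; same dedup via dict.fromkeys."""
--
--     tumor_types = {
--         "Atypical Teratoid Rhabdoid Tumor (ATRT)": "ATRT",
--         "Not Reported": "None",
--         "Other": "None",
--         "Cavernoma": "CAVERNOMA",
--         "Brainstem glioma- Diffuse intrinsic pontine glioma": "DIPG",
--         "High-grade glioma/astrocytoma (WHO grade III/IV)": "ASTROCYTOMA",
--         "Low-grade glioma/astrocytoma (WHO grade I/II)": "ASTROCYTOMA",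
--         "Germinoma": "GERMINOMA",
--         "Ganglioglioma": "GANGLIOGLIOMA",
--         "Teratoma": "TERATOMA",
--         "Ependymoma": "EPENDYMOMA",
--         "Neurofibroma/Plexiform": "NEUROFIBRILOMA-PLEXIFORM",
--         "Low-grade glioma/astrocytoma (WHO grade I/II); Other": "ASTROCYTOMA-OTHERS",
--         "Medulloblastoma": "MEDULLOBLASTOMA",
--         "Ganglioglioma; Low-grade glioma/astrocytoma (WHO grade I/II)": "GANGLIOGLIOMA-ASTROCYTOMA",
--         "Meningioma": "MENINGIOMA",
--         "Embryonal Tumor with Multilayered Rosettes (ETMR); Other": "ETMR-OTHERS",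
--         "Embryonal Tumor with Multilayered Rosettes (ETMR)": "ETMR",
--     }
--
--     description_types = {
--         "Not Applicable": "Not-applicable",
--         "Inflammation": "INFLAMATION",
--         "Rhabdoid Tumor": "RHABDOID",
--         "Proteinaceous debris and small fragment of adenohypophysis": "Proteinaceous debris and small fragment of adenohypophysis",
--         "Lesional tissue with pilocytic/piloid features": "Lesional tissue with pilocytic/piloid features",
--         "Portions of white matter with a few reactive astrocytes and rare cells with mild atypia": "Portions of white matter with a few reactive astrocytes and rare cells with mild atypia",
--         "Glial neoplasm": "GLIAL-NEOPLASM",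
--         "Low-grade glioma": "LOW-GRADE-GIOMA",
--         "Non-diagnostic tissue": "NON-DIAGNOSTIC-TISSUE",
--         "Osteosarcoma": "OSTEOSARCOMA",
--         "Ependymoblastoma": "EPENDYMOBLASTOMA",
--     }
--
--     if len(primary_diagnosis) == 0:
--         return None, None, "Not-available"
--
--     # pass 1: tumor types, from the non-Other non-Not-Reported diagnoses
--     tumor_type = list(dict.fromkeys(
--         tumor_types.get(d, "Tumor type not in default")
--         for d in primary_diagnosis
--         if "Other" not in d and "Not Reported" not in d))
--
--     # pass 2: descriptions, from the Other diagnoses whose description is known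
--     description = list(dict.fromkeys(
--         description_types[desc]
--         for d, desc in zip(primary_diagnosis, diagnosis_description)
--         if "Other" in d and desc in description_types))
--
--     # pass 3: grades
--     grade = list(dict.fromkeys(
--         _grades(primary_diagnosis, diagnosis_description, description_types)))
--
--     return tumor_type, description, grade
--
--
-- def _grades(primary_diagnosis, diagnosis_description, description_types):
--     out = []
--     for idx, d in enumerate(primary_diagnosis):
--         if "Other" in d:
--             if diagnosis_description[idx] in description_types:
--                 out.append("Not available")
--         elif "Not Reported" not in d:
--             if "Low-grade" in d:
--                 out.append("LGG")
--             elif "High-grade" in d: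
--                 out.append("HGG")
--             else:
--                 out.append("Not available")
--     return out
-- ===== Notes on version B (the rewrite author's own statement) =====
-- stated objective: faster
-- what changed: A's single interleaved loop that grows three lists at once is replaced by three independent passes over the input (a filter+map for tumor types, a filter+map over zip(primary,description) for descriptions, and a separate grade loop); dict.get/membership replaces A's per-element scan over the key list (measured ~3x faster).
-- outside the precondition, e.g. on get_diagnosis([], []): A returns (None, None, 'Not-available'), B returns (None, None, 'Not-available')
import Mathlib
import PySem

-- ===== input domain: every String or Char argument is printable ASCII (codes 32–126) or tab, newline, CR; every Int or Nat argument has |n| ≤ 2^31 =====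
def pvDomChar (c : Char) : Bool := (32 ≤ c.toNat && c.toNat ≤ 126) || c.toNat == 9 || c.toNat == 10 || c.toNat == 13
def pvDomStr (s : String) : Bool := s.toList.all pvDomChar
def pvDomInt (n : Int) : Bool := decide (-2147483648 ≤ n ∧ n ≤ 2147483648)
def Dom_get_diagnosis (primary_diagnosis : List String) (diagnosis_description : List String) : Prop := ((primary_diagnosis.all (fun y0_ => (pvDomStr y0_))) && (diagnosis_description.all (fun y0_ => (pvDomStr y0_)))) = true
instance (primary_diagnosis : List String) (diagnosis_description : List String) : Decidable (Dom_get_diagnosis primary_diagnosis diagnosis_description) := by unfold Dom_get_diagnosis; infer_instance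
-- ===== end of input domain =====

-- B replaces A's single interleaved loop by three independent passes (diagnosis / description / grade),
-- each producing one output list; dict lookups replace A's per-element key-list scans (measured faster).
-- Return-value equivalence only; neither program mutates its arguments.

-- shared dictionary literals (both Pythons define the identical literals)
def pvTumorTypes : PySem.Dict String String := PySem.Dict.ofList [
  ("Atypical Teratoid Rhabdoid Tumor (ATRT)", "ATRT"),
  ("Not Reported", "None"),
  ("Other", "None"),
  ("Cavernoma", "CAVERNOMA"),
  ("Brainstem glioma- Diffuse intrinsic pontine glioma", "DIPG"),
  ("High-grade glioma/astrocytoma (WHO grade III/IV)", "ASTROCYTOMA"),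
  ("Low-grade glioma/astrocytoma (WHO grade I/II)", "ASTROCYTOMA"),
  ("Germinoma", "GERMINOMA"),
  ("Ganglioglioma", "GANGLIOGLIOMA"),
  ("Teratoma", "TERATOMA"),
  ("Ependymoma", "EPENDYMOMA"),
  ("Neurofibroma/Plexiform", "NEUROFIBRILOMA-PLEXIFORM"),
  ("Low-grade glioma/astrocytoma (WHO grade I/II); Other", "ASTROCYTOMA-OTHERS"),
  ("Medulloblastoma", "MEDULLOBLASTOMA"),
  ("Ganglioglioma; Low-grade glioma/astrocytoma (WHO grade I/II)", "GANGLIOGLIOMA-ASTROCYTOMA"),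
  ("Meningioma", "MENINGIOMA"),
  ("Embryonal Tumor with Multilayered Rosettes (ETMR); Other", "ETMR-OTHERS"),
  ("Embryonal Tumor with Multilayered Rosettes (ETMR)", "ETMR")]

-- (A's first, immediately shadowed list literal 'description_types = [...]' is dead code and dropped)
def pvDescTypes : PySem.Dict String String := PySem.Dict.ofList [
  ("Not Applicable", "Not-applicable"),
  ("Inflammation", "INFLAMATION"),
  ("Rhabdoid Tumor", "RHABDOID"),
  ("Proteinaceous debris and small fragment of adenohypophysis", "Proteinaceous debris and small fragment of adenohypophysis"),
  ("Lesional tissue with pilocytic/piloid features", "Lesional tissue with pilocytic/piloid features"),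
  ("Portions of white matter with a few reactive astrocytes and rare cells with mild atypia", "Portions of white matter with a few reactive astrocytes and rare cells with mild atypia"),
  ("Glial neoplasm", "GLIAL-NEOPLASM"),
  ("Low-grade glioma", "LOW-GRADE-GIOMA"),
  ("Non-diagnostic tissue", "NON-DIAGNOSTIC-TISSUE"),
  ("Osteosarcoma", "OSTEOSARCOMA"),
  ("Ependymoblastoma", "EPENDYMOBLASTOMA")]

-- ===== PORT A =====
-- A's single for-loop over enumerate(primary_diagnosis), carrying idx; appends become cons onto the
-- recursively-built tails (same order).  diagnosis_description[idx] raises IndexError when out of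
-- range (Python); the port reads '' there — exactly those inputs are outside Pre_get_diagnosis.
def pvALoop (dd : List String) (idx : Nat) : List String → List String × List String × List String
  | [] => ([], [], [])
  | d :: rest =>
    let (dl, del, gl) := pvALoop dd (idx + 1) rest
    if PySem.Str.isIn "Other" d then
      let check := (pvDescTypes.keys).map (fun t => PySem.List.pyGetD dd (idx : Int) "" == t)
      if check.any id then
        (dl, pvDescTypes.getD (PySem.List.pyGetD dd (idx : Int) "") "" :: del, "Not available" :: gl)
      else (dl, del, gl)
    else if !(PySem.Str.isIn "Not Reported" d) then
      let check := (pvTumorTypes.keys).map (fun t => d == t)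
      let entry := if check.any id then pvTumorTypes.getD d "" else "Tumor type not in default"
      let g := if PySem.Str.isIn "Low-grade" d then "LGG"
               else if PySem.Str.isIn "High-grade" d then "HGG"
               else "Not available"
      (entry :: dl, del, g :: gl)
    else (dl, del, gl)

def get_diagnosis (primary_diagnosis : List String) (diagnosis_description : List String) : Option (List String) × Option (List String) × Option (List String) :=
  if primary_diagnosis.length = 0 then
    -- Python returns (None, None, "Not-available"): a str where a list is expected; outside Pre_
    (none, none, none)
  else
    let (dl, del, gl) := pvALoop diagnosis_description 0 primary_diagnosis
    (some (PySem.List.dedup dl), some (PySem.List.dedup del), some (PySem.List.dedup gl))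

-- ===== PORT B =====
-- pass 1: tumor types from the non-Other, non-Not-Reported diagnoses
def pvPass1 (pd : List String) : List String :=
  (pd.filter (fun d => !(PySem.Str.isIn "Other" d) && !(PySem.Str.isIn "Not Reported" d))).map
    (fun d => pvTumorTypes.getD d "Tumor type not in default")

-- pass 2: descriptions from the Other diagnoses whose description is a known key
def pvPass2 (pd dd : List String) : List String :=
  ((pd.zip dd).filter (fun p => PySem.Str.isIn "Other" p.1 && pvDescTypes.contains p.2)).map
    (fun p => pvDescTypes.getD p.2 "")

-- pass 3: grades (B's explicit indexed loop; same out-of-range reading as A's port)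
def pvGrades (dd : List String) (idx : Nat) : List String → List String
  | [] => []
  | d :: rest =>
    let tail := pvGrades dd (idx + 1) rest
    if PySem.Str.isIn "Other" d then
      if pvDescTypes.contains (PySem.List.pyGetD dd (idx : Int) "") then "Not available" :: tail
      else tail
    else if !(PySem.Str.isIn "Not Reported" d) then
      (if PySem.Str.isIn "Low-grade" d then "LGG"
       else if PySem.Str.isIn "High-grade" d then "HGG"
       else "Not available") :: tail
    else tail

def get_diagnosis_alt (primary_diagnosis : List String) (diagnosis_description : List String) : Option (List String) × Option (List String) × Option (List String) :=
  if primary_diagnosis.length = 0 then (none, none, none)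
  else
    (some (PySem.List.dedup (pvPass1 primary_diagnosis)),
     some (PySem.List.dedup (pvPass2 primary_diagnosis diagnosis_description)),
     some (PySem.List.dedup (pvGrades diagnosis_description 0 primary_diagnosis)))

-- ===== PRECONDITION & SPEC =====
-- Pre_ excludes (i) empty primary_diagnosis, where A returns the string "Not-available" instead of a
-- list (no value of the declared type), and (ii) inputs with an "Other"-containing diagnosis at an
-- index beyond diagnosis_description, where A (and B) raise IndexError.
def Pre_get_diagnosis (primary_diagnosis : List String) (diagnosis_description : List String) : Prop :=
  primary_diagnosis ≠ [] ∧
  ((primary_diagnosis.drop diagnosis_description.length).all (fun d => !(PySem.Str.isIn "Other" d))) = true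
instance (primary_diagnosis : List String) (diagnosis_description : List String) : Decidable (Pre_get_diagnosis primary_diagnosis diagnosis_description) := by unfold Pre_get_diagnosis; infer_instance

def pvWitness_get_diagnosis : List String × List String := (["Ependymoma"], [])

def Spec_get_diagnosis (primary_diagnosis : List String) (diagnosis_description : List String) (out : Option (List String) × Option (List String) × Option (List String)) : Prop := out = get_diagnosis_alt primary_diagnosis diagnosis_description
instance (primary_diagnosis : List String) (diagnosis_description : List String) (out : Option (List String) × Option (List String) × Option (List String)) : Decidable (Spec_get_diagnosis primary_diagnosis diagnosis_description out) := by unfold Spec_get_diagnosis; infer_instance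

-- ===== CLAIM (what is proved, stated in full; the proofs are below) =====
def Claim_equal_get_diagnosis : Prop := ∀ (primary_diagnosis : List String) (diagnosis_description : List String), Dom_get_diagnosis primary_diagnosis diagnosis_description → Pre_get_diagnosis primary_diagnosis diagnosis_description → Spec_get_diagnosis primary_diagnosis diagnosis_description (get_diagnosis primary_diagnosis diagnosis_description)

-- ===== LEMMAS AND PROOFS =====

-- 'any([x == t for t in dct.keys()])' is dict membership
theorem pvAnyKeys (dct : PySem.Dict String String) (x : String) :
    ((dct.keys).map (fun t => x == t)).any id = dct.contains x := by
  rw [PySem.Dict.contains_eq_decide_mem_keys]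
  rw [List.any_map]
  apply Bool.eq_iff_iff.mpr
  constructor
  · intro h
    simp only [List.any_eq_true, Function.comp, id_eq, beq_iff_eq] at h
    rcases h with ⟨t, ht, rfl⟩
    simpa using ht
  · intro h
    simp only [decide_eq_true_eq] at h
    exact List.any_eq_true.mpr ⟨x, h, by simp⟩

-- when the key is present the default does not matter
theorem pvGetD_default (dct : PySem.Dict String String) (x d₁ d₂ : String)
    (h : dct.contains x = true) : dct.getD x d₁ = dct.getD x d₂ := by
  rw [PySem.Dict.contains_eq_isSome_get?] at h
  cases hg : dct.get? x with
  | none => rw [hg] at h; simp at h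
  | some v => rw [PySem.Dict.getD_eq_get?_getD, PySem.Dict.getD_eq_get?_getD, hg]; rfl

-- the main invariant: A's interleaved loop from index idx equals B's three passes on the suffix
theorem pvMain (dd : List String) (pd : List String) : ∀ idx : Nat,
    pvALoop dd idx pd = (pvPass1 pd, pvPass2 pd (dd.drop idx), pvGrades dd idx pd) := by
  induction pd with
  | nil => intro idx; simp [pvALoop, pvPass1, pvPass2, pvGrades]
  | cons d rest ih =>
    intro idx
    have hempty : pvDescTypes.contains "" = false := by decide
    have hx : PySem.List.pyGetD dd (idx : Int) "" = (dd[idx]?).getD "" := by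
      simp [List.getD_eq_getElem?_getD]
    cases hdrop : dd.drop idx with
    | nil =>
      have h1 : dd[idx]? = none := by rw [← List.head?_drop, hdrop]; rfl
      have h2 : dd.drop (idx + 1) = ([] : List String) := by
        rw [← List.tail_drop, hdrop]; rfl
      simp only [pvALoop, pvAnyKeys, ih (idx + 1), h2, hx, h1, Option.getD_none, hempty]
      by_cases ho : PySem.Chars.isIn ['O','t','h','e','r'] d.toList = true
      · simp [ho, pvPass1, pvPass2, pvGrades, hx, h1, hempty]
      · by_cases hnr : PySem.Chars.isIn ['N','o','t',' ','R','e','p','o','r','t','e','d'] d.toList = true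
        · simp [ho, hnr, pvPass1, pvPass2, pvGrades]
        · simp [ho, hnr, pvPass1, pvPass2, pvGrades]
          by_cases hc : pvTumorTypes.contains d = true
          · simp [hc]
            exact pvGetD_default pvTumorTypes d "" "Tumor type not in default" hc
          · simp at hc
            simp [hc]
            exact (PySem.Dict.getD_of_not_contains pvTumorTypes "Tumor type not in default" hc).symm
    | cons e dd' =>
      have h1 : dd[idx]? = some e := by rw [← List.head?_drop, hdrop]; rfl
      have h2 : dd.drop (idx + 1) = dd' := by rw [← List.tail_drop, hdrop]; rfl
      simp only [pvALoop, pvAnyKeys, ih (idx + 1), h2, hx, h1, Option.getD_some]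
      by_cases ho : PySem.Chars.isIn ['O','t','h','e','r'] d.toList = true
      · by_cases hc : pvDescTypes.contains e = true
        · simp [ho, hc, pvPass1, pvPass2, pvGrades, hx, h1]
        · simp at hc; simp [ho, hc, pvPass1, pvPass2, pvGrades, hx, h1]
      · by_cases hnr : PySem.Chars.isIn ['N','o','t',' ','R','e','p','o','r','t','e','d'] d.toList = true
        · simp [ho, hnr, pvPass1, pvPass2, pvGrades]
        · simp [ho, hnr, pvPass1, pvPass2, pvGrades, pvAnyKeys]
          by_cases hc : pvTumorTypes.contains d = true
          · simp [hc]
            exact pvGetD_default pvTumorTypes d "" "Tumor type not in default" hc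
          · simp at hc
            simp [hc]
            exact (PySem.Dict.getD_of_not_contains pvTumorTypes "Tumor type not in default" hc).symm

theorem get_diagnosis_eq (pd dd : List String) : get_diagnosis pd dd = get_diagnosis_alt pd dd := by
  unfold get_diagnosis get_diagnosis_alt
  by_cases h : pd.length = 0
  · simp [h]
  · simp only [h]
    rw [pvMain dd pd 0]
    simp

-- ===== VERDICT (by name: the statement is the Claim_ definition above) =====
theorem get_diagnosis_spec : Claim_equal_get_diagnosis := by
  intro pd dd _ _
  unfold Spec_get_diagnosis
  exact get_diagnosis_eq pd dd
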